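-- pv_equiv track=rewrite | github.com/chiragjn/advent-of-code-solutions | 2017/solutions/day17_part1.py | solve
-- ===== SOURCE A (Python) =====
-- def solve(n, till):
--     # Naive solution
--     state = [0]
--     current_index = 0
--     for i in range(1, till + 1):
--         split_at = ((current_index + n) % len(state)) + 1
--         state = state[:split_at] + [i] + state[split_at:]
--         current_index = split_at
--     answer = state[(state.index(till) + 1) % len(state)]
--     return answer
-- ===== SOURCE B (Python) =====
-- def solve(n, till):
--     # Track only insertion indices (O(till)); then undo inserts backward to find
--     # which value ends up just after the last inserted one.
--     pos = 0
--     size = 1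
--     inserts = []
--     for i in range(1, till + 1):
--         pos = (pos + n) % size + 1
--         inserts.append((i, pos))
--         size += 1
--     t = (pos + 1) % size
--     for i, p in reversed(inserts):
--         if t == p:
--             return i
--         if t > p:
--             t -= 1
--     return 0
-- ===== Notes on version B (the rewrite author's own statement) =====
-- stated objective: faster
-- what changed: Instead of materialising the circular buffer with O(size) list slicing per insert, B records only the O(1) insertion index of each value, then walks the recorded inserts backwards once to recover which value ends at the slot after the last insert.
import Mathlib
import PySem

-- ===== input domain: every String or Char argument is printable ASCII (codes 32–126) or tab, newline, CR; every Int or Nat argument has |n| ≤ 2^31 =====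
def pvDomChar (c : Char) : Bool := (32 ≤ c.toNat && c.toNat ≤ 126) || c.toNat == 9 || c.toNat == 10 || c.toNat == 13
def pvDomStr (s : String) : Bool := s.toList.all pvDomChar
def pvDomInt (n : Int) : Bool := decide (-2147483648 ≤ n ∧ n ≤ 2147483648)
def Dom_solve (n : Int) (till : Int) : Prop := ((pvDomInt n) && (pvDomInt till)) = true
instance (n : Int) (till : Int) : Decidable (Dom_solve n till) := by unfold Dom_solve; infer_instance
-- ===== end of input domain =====

-- B replaces A's O(size)-per-insert list slicing by recording only each insertion index
-- and one backward pass over those records (asymptotically faster); proved to return A's value for all till ≥ 0.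

-- ===== PORT A =====
-- one iteration of A's loop body: split_at, rebuild state by slicing, move current_index
def stepA (n : Int) (acc : List Int × Int) (i : Int) : List Int × Int :=
  let sp := PySem.Int.mod (acc.2 + n) (acc.1.length : Int) + 1
  (PySem.List.slice acc.1 none (some sp) ++ [i] ++ PySem.List.slice acc.1 (some sp) none, sp)

def solve (n : Int) (till : Int) : Int :=
  let r := (PySem.List.pyRange 1 (till + 1) 1).foldl (stepA n) ([0], 0)
  match PySem.List.index? r.1 till with
  | some idx => (PySem.List.pyGet? r.1 (PySem.Int.mod ((idx : Int) + 1) (r.1.length : Int))).getD 0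
  | none => 0   -- Python raises ValueError here (till ∉ state, i.e. till < 0); excluded by Pre_solve

-- ===== PORT B =====
-- B's second loop: walk the recorded inserts newest-first, undoing each index shift
def scanBack : List (Int × Int) → Int → Int
  | [], _ => 0
  | (i, p) :: rest, t =>
    if t = p then i else if t > p then scanBack rest (t - 1) else scanBack rest t

-- one iteration of B's first loop: new position, record it, grow size
def stepB (n : Int) (acc : Int × List (Int × Int) × Int) (i : Int) : Int × List (Int × Int) × Int :=
  let p := PySem.Int.mod (acc.1 + n) acc.2.2 + 1
  (p, acc.2.1 ++ [(i, p)], acc.2.2 + 1)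

def solve_alt (n : Int) (till : Int) : Int :=
  let r := (PySem.List.pyRange 1 (till + 1) 1).foldl (stepB n) (0, [], 1)
  scanBack r.2.1.reverse (PySem.Int.mod (r.1 + 1) r.2.2)

-- ===== PRECONDITION & SPEC =====
-- Pre_ excludes exactly till < 0, where A raises ValueError (state.index(till) finds nothing).
def Pre_solve (n : Int) (till : Int) : Prop := 0 ≤ till
instance (n : Int) (till : Int) : Decidable (Pre_solve n till) := by unfold Pre_solve; infer_instance
def pvWitness_solve : Int × Int := (3, 5)

def Spec_solve (n : Int) (till : Int) (out : Int) : Prop := out = solve_alt n till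
instance (n : Int) (till : Int) (out : Int) : Decidable (Spec_solve n till out) := by unfold Spec_solve; infer_instance

-- ===== CLAIM (what is proved, stated in full; the proofs are below) =====
def Claim_equal_solve : Prop := ∀ (n : Int) (till : Int), Dom_solve n till → Pre_solve n till → Spec_solve n till (solve n till)

-- ===== LEMMAS AND PROOFS =====

-- splicing a value in at index s is List.insertIdx
theorem take_cons_drop_eq_insertIdx {α : Type} (xs : List α) (s : Nat) (hs : s ≤ xs.length) (v : α) :
    xs.take s ++ v :: xs.drop s = xs.insertIdx s v := by
  induction s generalizing xs with
  | zero => simp [List.insertIdx_zero]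
  | succ s ih =>
    cases xs with
    | nil => simp at hs
    | cons x xs =>
      simp only [List.take_succ_cons, List.drop_succ_cons, List.insertIdx_succ_cons,
        List.cons_append]
      exact congrArg (x :: ·) (ih xs (by simpa using hs))

-- first occurrence at c: the element at c is v and no earlier slot holds v
theorem index?_eq_of_getElem? (xs : List Int) (v : Int) (c : Nat)
    (hc : xs[c]? = some v) (hf : ∀ j, j < c → xs[j]? ≠ some v) :
    PySem.List.index? xs v = some c := by
  have hlt : c < xs.length := (List.getElem?_eq_some_iff.mp hc).1
  have hv : xs[c] = v := (List.getElem?_eq_some_iff.mp hc).2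
  rw [PySem.List.index?_eq_some_iff]
  refine ⟨xs.take c, xs.drop (c + 1), ?_, by simp [Nat.le_of_lt hlt], ?_⟩
  · conv_lhs => rw [← List.take_append_drop c xs]
    rw [← List.getElem_cons_drop hlt, hv]
  · intro hm
    obtain ⟨j, hj, he⟩ := List.mem_iff_getElem.mp hm
    have hj' : j < c := by
      have := hj
      rw [List.length_take] at this
      omega
    refine hf j hj' ?_
    have : xs[j] = v := by simpa [List.getElem_take] using he
    exact List.getElem?_eq_some_iff.mpr ⟨Nat.lt_of_lt_of_le hj' (Nat.le_of_lt hlt), this⟩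

-- the joint invariant of A's buffer-building loop and B's position-recording loop after k inserts
def SpinInv (k : Nat) (a : List Int × Int) (b : Int × List (Int × Int) × Int) : Prop :=
  a.2 = b.1 ∧ a.1.length = k + 1 ∧ b.2.2 = (k : Int) + 1 ∧ 0 ≤ a.2 ∧ a.2 < (k : Int) + 1 ∧
  (∀ t : Int, 0 ≤ t → t < (k : Int) + 1 → a.1[t.toNat]? = some (scanBack b.2.1.reverse t)) ∧
  a.1[a.2.toNat]? = some (k : Int) ∧
  (∀ j : Nat, j < a.2.toNat → a.1[j]? ≠ some (k : Int)) ∧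
  (∀ x ∈ a.1, x ≤ (k : Int))

theorem inv_loop (n : Int) (k : Nat) :
    SpinInv k ((PySem.List.pyRange 1 ((k : Int) + 1) 1).foldl (stepA n) ([0], 0))
          ((PySem.List.pyRange 1 ((k : Int) + 1) 1).foldl (stepB n) (0, [], 1)) := by
  induction k with
  | zero =>
    rw [PySem.List.pyRange_one_eq_nil (by omega)]
    simp only [List.foldl_nil]
    refine ⟨rfl, rfl, rfl, le_refl _, by norm_num, ?_, rfl, by omega, ?_⟩
    · intro t ht0 ht1
      have : t = 0 := by omega
      subst this
      rfl
    · intro x hx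
      simp at hx
      omega
  | succ k ih =>
    have hsplit : PySem.List.pyRange 1 ((↑(k + 1) : Int) + 1) 1 =
        PySem.List.pyRange 1 ((k : Int) + 1) 1 ++ [(k : Int) + 1] := by
      have : ((↑(k + 1) : Int) + 1) = ((k : Int) + 1) + 1 := by push_cast; ring
      rw [this, PySem.List.pyRange_one_succ_right (by omega)]
    rw [hsplit, List.foldl_append, List.foldl_append]
    set a0 := (PySem.List.pyRange 1 ((k : Int) + 1) 1).foldl (stepA n) ([0], 0) with ha0
    set b0 := (PySem.List.pyRange 1 ((k : Int) + 1) 1).foldl (stepB n) (0, [], 1) with hb0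
    obtain ⟨hcp, hlen, hsize, hc0, hck, hidx, hlast, hfirst, hub⟩ := ih
    simp only [List.foldl_cons, List.foldl_nil]
    -- the two loop bodies compute the same split index sp
    have hlenI : (a0.1.length : Int) = (k : Int) + 1 := by rw [hlen]; push_cast; ring
    set sp := PySem.Int.mod (a0.2 + n) ((a0.1.length : Int)) + 1 with hsp
    have hposI : 0 < (a0.1.length : Int) := by omega
    have hm0 : 0 ≤ PySem.Int.mod (a0.2 + n) ((a0.1.length : Int)) := PySem.Int.mod_nonneg _ hposI
    have hmlt : PySem.Int.mod (a0.2 + n) ((a0.1.length : Int)) < (a0.1.length : Int) :=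
      PySem.Int.mod_lt _ hposI
    have hsp1 : 1 ≤ sp := by omega
    have hspk : sp ≤ (k : Int) + 1 := by omega
    have hstepB : stepB n b0 ((k : Int) + 1) = (sp, b0.2.1 ++ [((k : Int) + 1, sp)], b0.2.2 + 1) := by
      simp only [stepB, hsp, ← hcp, hsize, hlenI]
    have hsN : (sp.toNat : Int) = sp := Int.toNat_of_nonneg (by omega)
    have hsle : sp.toNat ≤ a0.1.length := by omega
    have hstepA : stepA n a0 ((k : Int) + 1) =
        (a0.1.insertIdx sp.toNat ((k : Int) + 1), sp) := by
      simp only [stepA, ← hsp]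
      rw [PySem.List.slice_to _ (by omega), PySem.List.slice_from _ (by omega)]
      rw [List.append_assoc, List.singleton_append,
        take_cons_drop_eq_insertIdx _ _ hsle]
    rw [hstepA, hstepB]
    have hlen' : (a0.1.insertIdx sp.toNat ((k : Int) + 1)).length = (k + 1) + 1 := by
      rw [List.length_insertIdx, if_pos hsle, hlen]
    have hrev : (b0.2.1 ++ [((k : Int) + 1, sp)]).reverse =
        ((k : Int) + 1, sp) :: b0.2.1.reverse := by simp
    -- getElem? of the new buffer
    have hget : ∀ j : Nat, (a0.1.insertIdx sp.toNat ((k : Int) + 1))[j]? =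
        if j < sp.toNat then a0.1[j]? else if j = sp.toNat then some ((k : Int) + 1)
        else a0.1[j - 1]? := by
      intro j
      rw [List.getElem?_insertIdx]
      split_ifs with h1 h2 <;> simp_all
    refine ⟨rfl, hlen', by push_cast [hsize]; ring, by omega, by rw [hlen'] at *; push_cast; omega,
      ?_, ?_, ?_, ?_⟩
    · -- index invariant
      intro t ht0 ht1
      rw [hrev]
      simp only [scanBack]
      rcases lt_trichotomy t sp with hlt | heq | hgt
      · rw [if_neg (by omega), if_neg (by omega), hget, if_pos (by omega)]
        exact hidx t ht0 (by omega)
      · subst heq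
        rw [if_pos rfl, hget, if_neg (by omega), if_pos rfl]
      · rw [if_neg (by omega), if_pos (by omega), hget, if_neg (by omega), if_neg (by omega)]
        have h1 : (t - 1).toNat = t.toNat - 1 := by omega
        rw [← h1]
        exact hidx (t - 1) (by omega) (by push_cast at ht1 ⊢; omega)
    · -- newest value sits at the new current index
      rw [hget, if_neg (by omega), if_pos rfl]
      norm_num
    · -- and not before it
      intro j hj
      rw [hget, if_pos hj]
      intro hcontra
      have hmem : ((k : Int) + 1) ∈ a0.1 := by
        have := List.getElem?_eq_some_iff.mp (by push_cast at hcontra ⊢; exact hcontra)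
        exact this.2 ▸ List.getElem_mem _
      have := hub _ hmem
      omega
    · -- all elements bounded by the newest value
      intro x hx
      rw [← take_cons_drop_eq_insertIdx _ _ hsle] at hx
      simp only [List.mem_append, List.mem_cons] at hx
      push_cast
      rcases hx with h | h | h
      · have := hub x (List.mem_of_mem_take h); omega
      · omega
      · have := hub x (List.mem_of_mem_drop h); omega

-- ===== VERDICT (by name: the statement is the Claim_ definition above) =====
theorem solve_spec : Claim_equal_solve := by
  intro n till _ hpre
  unfold Spec_solve
  obtain ⟨k, hk⟩ : ∃ k : Nat, till = (k : Int) := ⟨till.toNat, (Int.toNat_of_nonneg hpre).symm⟩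
  subst hk
  obtain ⟨hcp, hlen, hsize, hc0, hck, hidx, hlast, hfirst, hub⟩ := inv_loop n k
  set a0 := (PySem.List.pyRange 1 ((k : Int) + 1) 1).foldl (stepA n) ([0], 0) with ha0
  set b0 := (PySem.List.pyRange 1 ((k : Int) + 1) 1).foldl (stepB n) (0, [], 1) with hb0
  have hidxF : PySem.List.index? a0.1 (k : Int) = some a0.2.toNat :=
    index?_eq_of_getElem? _ _ _ hlast hfirst
  have hA : solve n (k : Int) = (match PySem.List.index? a0.1 ((k : Int)) with
      | some idx => (PySem.List.pyGet? a0.1 (PySem.Int.mod ((idx : Int) + 1) (a0.1.length : Int))).getD 0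
      | none => 0) := rfl
  have hB : solve_alt n (k : Int) = scanBack b0.2.1.reverse (PySem.Int.mod (b0.1 + 1) b0.2.2) := rfl
  rw [hA, hB]
  simp only [hidxF]
  have hcN : ((a0.2.toNat : Nat) : Int) = a0.2 := Int.toNat_of_nonneg hc0
  have hlenI : (a0.1.length : Int) = (k : Int) + 1 := by rw [hlen]; push_cast; ring
  have hpos : (0 : Int) < (k : Int) + 1 := by omega
  set t := PySem.Int.mod (a0.2 + 1) ((k : Int) + 1) with hT
  have ht0 : 0 ≤ t := PySem.Int.mod_nonneg _ hpos
  have ht1 : t < (k : Int) + 1 := PySem.Int.mod_lt _ hpos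
  rw [hsize, ← hcp, hcN, hlenI, ← hT, PySem.List.pyGet?_of_nonneg _ ht0, hidx t ht0 ht1]
  rfl
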